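-- pv_equiv track=rewrite | github.com/rlabarca/purlin | tests/pl_web_test/test_command.py | _parse_url_override
-- ===== SOURCE A (Python) =====
-- def _parse_url_override(args):
--     """Parse URL override from argument list.
--
--     A URL override is an argument starting with http:// or https://.
--     Returns (feature_names, url_override).
--     """
--     features = []
--     url_override = None
--     for arg in args:
--         if arg.startswith('http://') or arg.startswith('https://'):
--             url_override = arg
--         else:
--             features.append(arg)
--     return features, url_override
-- ===== SOURCE B (Python) =====
-- def _parse_url_override(args):
--     """Parse URL override from argument list.
--
--     Two independent passes: a filter comprehension for features, and a
--     reversed scan picking the last URL (or None).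
--     """
--     def is_url(a):
--         return a.startswith('http://') or a.startswith('https://')
--     features = [a for a in args if not is_url(a)]
--     url_override = next((a for a in reversed(args) if is_url(a)), None)
--     return features, url_override
-- ===== Notes on version B (the rewrite author's own statement) =====
-- stated objective: idiomatic
-- what changed: Replaces the single stateful accumulating loop with two independent passes: a filter comprehension for features and a reversed-scan next(...) picking the last URL.
import Mathlib
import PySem

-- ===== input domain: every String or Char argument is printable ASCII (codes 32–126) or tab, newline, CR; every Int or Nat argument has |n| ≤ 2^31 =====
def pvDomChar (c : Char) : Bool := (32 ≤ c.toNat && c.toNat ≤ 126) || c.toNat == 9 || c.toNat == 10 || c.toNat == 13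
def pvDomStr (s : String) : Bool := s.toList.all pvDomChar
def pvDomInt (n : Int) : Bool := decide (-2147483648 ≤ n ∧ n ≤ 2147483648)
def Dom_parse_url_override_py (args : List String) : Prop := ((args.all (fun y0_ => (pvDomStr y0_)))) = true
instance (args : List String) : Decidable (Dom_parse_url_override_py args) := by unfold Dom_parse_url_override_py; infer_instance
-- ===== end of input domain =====

-- ===== PORT A =====
-- B replaces A's single stateful loop with two independent passes (filter + reversed find); idiomatic decomposition, same cost.
def parse_url_override_py (args : List String) : List String × Option String :=
  args.foldl
    (fun st arg =>
      if PySem.Str.startswith arg "http://" || PySem.Str.startswith arg "https://" then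
        (st.1, some arg)
      else
        (st.1 ++ [arg], st.2))
    ([], none)

-- ===== PORT B =====
def pvIsUrl (a : String) : Bool :=
  PySem.Str.startswith a "http://" || PySem.Str.startswith a "https://"

def parse_url_override_py_alt (args : List String) : List String × Option String :=
  (args.filter (fun a => !pvIsUrl a), args.reverse.find? pvIsUrl)

-- ===== PRECONDITION & SPEC =====
def Spec_parse_url_override_py (args : List String) (out : List String × Option String) : Prop := out = parse_url_override_py_alt args
instance (args : List String) (out : List String × Option String) : Decidable (Spec_parse_url_override_py args out) := by unfold Spec_parse_url_override_py; infer_instance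

-- ===== CLAIM (what is proved, stated in full; the proofs are below) =====
def Claim_equal_parse_url_override_py : Prop := ∀ (args : List String), Dom_parse_url_override_py args → Spec_parse_url_override_py args (parse_url_override_py args)

-- ===== LEMMAS AND PROOFS =====

theorem pv_foldl_split (args : List String) : ∀ (fs : List String) (u : Option String),
    args.foldl
      (fun st arg =>
        if pvIsUrl arg then (st.1, some arg) else (st.1 ++ [arg], st.2))
      (fs, u)
    = (fs ++ args.filter (fun a => !pvIsUrl a), (args.reverse.find? pvIsUrl).or u) := by
  induction args with
  | nil => intro fs u; simp
  | cons a rest ih =>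
    intro fs u
    cases h : pvIsUrl a <;>
      simp [ih, List.find?_append, h]

-- ===== VERDICT (by name: the statement is the Claim_ definition above) =====
theorem parse_url_override_py_spec : Claim_equal_parse_url_override_py := by
  intro args _
  unfold Spec_parse_url_override_py parse_url_override_py parse_url_override_py_alt
  show List.foldl (fun st arg => if pvIsUrl arg then (st.1, some arg) else (st.1 ++ [arg], st.2)) ([], none) args = _
  rw [pv_foldl_split]
  simp
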